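-- pv_equiv track=rewrite | github.com/KOPFYF/LCEveryday | Array/meeting rooms/carPooling1094.py | sweep_maxnum
-- ===== SOURCE A (Python) =====
-- def sweep_maxnum(intervals):
--     events = []
--     for s, e in intervals:
--         events.append((s, 1))
--         events.append((e, -1))
--
--     events.sort() # O(nlogn)
--     cnt = 0
--     max_cnt = 0
--     res = None
--
--     for se, diff in events:
--         cnt += diff
--         if cnt > max_cnt:
--             res = se
--             max_cnt = cnt
--     return res
-- ===== SOURCE B (Python) =====
-- def sweep_maxnum(intervals):
--     starts = []
--     ends = []
--     for s, e in intervals: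
--         starts.append(s)
--         ends.append(e)
--     starts.sort()
--     ends.sort()
--     cnt = 0
--     max_cnt = 0
--     res = None
--     i = 0
--     j = 0
--     n = len(starts)
--     while i < n:
--         if j >= n or starts[i] < ends[j]:
--             cnt += 1
--             if cnt > max_cnt:
--                 max_cnt = cnt
--                 res = starts[i]
--             i += 1
--         else:
--             cnt -= 1
--             j += 1
--     return res
-- ===== Notes on version B (the rewrite author's own statement) =====
-- stated objective: alternative
-- what changed: Instead of building, sorting and scanning one 2n-element (coordinate, diff) event list, B sorts the start and end coordinates separately and runs a two-pointer merge sweep over the two sorted lists, counting opens/closes as it goes.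
import Mathlib
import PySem

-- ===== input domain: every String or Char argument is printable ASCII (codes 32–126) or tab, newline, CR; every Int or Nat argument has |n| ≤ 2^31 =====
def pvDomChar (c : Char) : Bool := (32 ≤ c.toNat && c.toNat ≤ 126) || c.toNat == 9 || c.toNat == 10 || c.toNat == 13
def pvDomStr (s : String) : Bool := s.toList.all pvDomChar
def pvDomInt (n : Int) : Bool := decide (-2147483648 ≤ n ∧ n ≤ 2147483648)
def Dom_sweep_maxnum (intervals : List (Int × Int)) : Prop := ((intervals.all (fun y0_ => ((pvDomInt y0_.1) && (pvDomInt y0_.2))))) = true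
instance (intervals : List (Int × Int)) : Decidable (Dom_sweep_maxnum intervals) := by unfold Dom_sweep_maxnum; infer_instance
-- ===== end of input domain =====

-- B replaces A's sort of a 2n-element event list by sorting starts and ends separately
-- and sweeping them with two pointers ('alternative' objective; return values proved equal).

-- ===== PORT A =====
-- A's loop body: cnt += diff; if cnt > max_cnt: res = se; max_cnt = cnt  (state = (cnt, max_cnt, res))
def sweepStepA (st : Int × Int × Option Int) (ev : Int × Int) : Int × Int × Option Int :=
  let cnt := st.1 + ev.2
  if st.2.1 < cnt then (cnt, cnt, some ev.1) else (cnt, st.2.1, st.2.2)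

def sweep_maxnum (intervals : List (Int × Int)) : Option Int :=
  let events := intervals.foldl (fun es p => es ++ [(p.1, (1 : Int)), (p.2, (-1 : Int))]) []
  let sortedE := PySem.List.sorted2 events (fun p => p.1) (fun p => p.2)
  (sortedE.foldl sweepStepA (0, 0, none)).2.2

-- ===== PORT B =====
-- B's while loop: recursion over the two sorted lists replaces the i/j index pair
def sweepLoopB : List Int → List Int → Int → Int → Option Int → Option Int
  | [], _, _, _, res => res
  | s :: st, en, cnt, mx, res =>
    match en with
    | [] =>
      if mx < cnt + 1 then sweepLoopB st [] (cnt + 1) (cnt + 1) (some s)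
      else sweepLoopB st [] (cnt + 1) mx res
    | e :: en' =>
      if s < e then
        (if mx < cnt + 1 then sweepLoopB st (e :: en') (cnt + 1) (cnt + 1) (some s)
         else sweepLoopB st (e :: en') (cnt + 1) mx res)
      else sweepLoopB (s :: st) en' (cnt - 1) mx res
termination_by st en => st.length + en.length

def sweep_maxnum_alt (intervals : List (Int × Int)) : Option Int :=
  let starts := PySem.List.sorted (intervals.map (fun p => p.1)) (fun x => x)
  let ends := PySem.List.sorted (intervals.map (fun p => p.2)) (fun x => x)
  sweepLoopB starts ends 0 0 none

-- ===== PRECONDITION & SPEC =====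
def Spec_sweep_maxnum (intervals : List (Int × Int)) (out : Option Int) : Prop := out = sweep_maxnum_alt intervals
instance (intervals : List (Int × Int)) (out : Option Int) : Decidable (Spec_sweep_maxnum intervals out) := by unfold Spec_sweep_maxnum; infer_instance

-- ===== CLAIM (what is proved, stated in full; the proofs are below) =====
def Claim_equal_sweep_maxnum : Prop := ∀ (intervals : List (Int × Int)), Dom_sweep_maxnum intervals → Spec_sweep_maxnum intervals (sweep_maxnum intervals)

-- ===== LEMMAS AND PROOFS =====

-- the event order B's two-pointer sweep traverses, as a list (proof device)
def mEv : List Int → List Int → List (Int × Int)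
  | [], en => en.map (fun e => (e, -1))
  | s :: st, [] => (s, 1) :: mEv st []
  | s :: st, e :: en =>
    if s < e then (s, 1) :: mEv st (e :: en) else (e, -1) :: mEv (s :: st) en
termination_by st en => st.length + en.length

-- Python's lexicographic ≤ on the (coordinate, diff) pairs
def lexLE (a b : Int × Int) : Prop := a.1 < b.1 ∨ (a.1 = b.1 ∧ a.2 ≤ b.2)

theorem lexLE_trans {a b c : Int × Int} (h1 : lexLE a b) (h2 : lexLE b c) : lexLE a c := by
  unfold lexLE at *; omega

theorem mem_mEv {x : Int × Int} : ∀ st en, x ∈ mEv st en →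
    (x.2 = 1 ∧ x.1 ∈ st) ∨ (x.2 = -1 ∧ x.1 ∈ en)
  | [], en, h => by
    simp only [mEv, List.mem_map] at h
    obtain ⟨e, he, rfl⟩ := h
    right; exact ⟨rfl, he⟩
  | s :: st, [], h => by
    simp only [mEv, List.mem_cons] at h
    rcases h with rfl | h
    · left; simp
    · rcases mem_mEv st [] h with ⟨h2, h1⟩ | ⟨_, h1⟩
      · left; exact ⟨h2, List.mem_cons_of_mem _ h1⟩
      · simp at h1
  | s :: st, e :: en, h => by
    simp only [mEv] at h
    split at h
    · rcases List.mem_cons.mp h with rfl | h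
      · left; simp
      · rcases mem_mEv st (e :: en) h with ⟨h2, h1⟩ | ⟨h2, h1⟩
        · left; exact ⟨h2, List.mem_cons_of_mem _ h1⟩
        · right; exact ⟨h2, h1⟩
    · rcases List.mem_cons.mp h with rfl | h
      · right; simp
      · rcases mem_mEv (s :: st) en h with ⟨h2, h1⟩ | ⟨h2, h1⟩
        · left; exact ⟨h2, h1⟩
        · right; exact ⟨h2, List.mem_cons_of_mem _ h1⟩
termination_by st en => st.length + en.length

theorem mEv_perm : ∀ st en : List Int,
    (mEv st en).Perm (st.map (fun s => (s, 1)) ++ en.map (fun e => (e, -1)))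
  | [], en => by simp [mEv]
  | s :: st, [] => by
    simpa [mEv] using (mEv_perm st []).cons (s, 1)
  | s :: st, e :: en => by
    simp only [mEv]
    split
    · simpa using (mEv_perm st (e :: en)).cons (s, 1)
    · refine ((mEv_perm (s :: st) en).cons (e, -1)).trans ?_
      simpa using (List.perm_middle (a := (e, (-1 : Int)))
        (l₁ := (s, (1 : Int)) :: st.map (fun s => (s, 1))) (l₂ := en.map (fun e => (e, -1)))).symm
termination_by st en => st.length + en.length

theorem mEv_pairwise : ∀ st en : List Int,
    st.Pairwise (· ≤ ·) → en.Pairwise (· ≤ ·) → (mEv st en).Pairwise lexLE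
  | [], en, _, he => by
    simpa [mEv] using he.map (f := fun e => (e, (-1 : Int)))
      (fun a b h => by unfold lexLE; rcases lt_or_eq_of_le h with h | h <;> simp [h])
  | s :: st, [], hs, he => by
    simp only [mEv, List.pairwise_cons]
    refine ⟨fun z hz => ?_, mEv_pairwise st [] (List.Pairwise.of_cons hs) he⟩
    rcases mem_mEv st [] hz with ⟨h2, h1⟩ | ⟨_, h1⟩
    · have := (List.pairwise_cons.mp hs).1 _ h1
      unfold lexLE; rcases lt_or_eq_of_le this with h | h <;> simp [h, h2]
    · simp at h1
  | s :: st, e :: en, hs, he => by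
    simp only [mEv]
    split
    · rename_i hse
      simp only [List.pairwise_cons]
      refine ⟨fun z hz => ?_, mEv_pairwise st (e :: en) (List.Pairwise.of_cons hs) he⟩
      rcases mem_mEv st (e :: en) hz with ⟨h2, h1⟩ | ⟨h2, h1⟩
      · have := (List.pairwise_cons.mp hs).1 _ h1
        unfold lexLE; rcases lt_or_eq_of_le this with h | h <;> simp [h, h2]
      · have : e ≤ z.1 := by
          rcases List.mem_cons.mp h1 with rfl | h1
          · exact le_refl _
          · exact (List.pairwise_cons.mp he).1 _ h1
        exact Or.inl (lt_of_lt_of_le hse this)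
    · rename_i hse
      rw [not_lt] at hse
      simp only [List.pairwise_cons]
      refine ⟨fun z hz => ?_, mEv_pairwise (s :: st) en hs (List.Pairwise.of_cons he)⟩
      rcases mem_mEv (s :: st) en hz with ⟨h2, h1⟩ | ⟨h2, h1⟩
      · have hsz : s ≤ z.1 := by
          rcases List.mem_cons.mp h1 with rfl | h1
          · exact le_refl _
          · exact (List.pairwise_cons.mp hs).1 _ h1
        have : e ≤ z.1 := le_trans hse hsz
        unfold lexLE; rcases lt_or_eq_of_le this with h | h <;> simp [h, h2]
      · have := (List.pairwise_cons.mp he).1 _ h1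
        unfold lexLE; rcases lt_or_eq_of_le this with h | h <;> simp [h, h2]
termination_by st en => st.length + en.length

-- A's insertion sort (sorted2) produces a lexLE-pairwise list
theorem pairwise_insertBy_lex (x : Int × Int) (ys : List (Int × Int))
    (h : ys.Pairwise lexLE) :
    (PySem.List.insertBy
      (fun a b => decide (a.1 < b.1) || !decide (b.1 < a.1) && decide (a.2 < b.2)) x ys).Pairwise lexLE := by
  induction ys with
  | nil => simp [PySem.List.insertBy]
  | cons y ys ih =>
    rw [List.pairwise_cons] at h
    simp only [PySem.List.insertBy]
    split
    · rename_i hb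
      simp only [Bool.or_eq_true, Bool.and_eq_true, Bool.not_eq_true', decide_eq_true_eq,
        decide_eq_false_iff_not] at hb
      have hxy : lexLE x y := by unfold lexLE; omega
      rw [List.pairwise_cons]
      refine ⟨fun z hz => ?_, List.pairwise_cons.mpr h⟩
      rcases List.mem_cons.mp hz with rfl | hz
      · exact hxy
      · exact lexLE_trans hxy (h.1 _ hz)
    · rename_i hb
      simp only [Bool.or_eq_true, Bool.and_eq_true, Bool.not_eq_true', decide_eq_true_eq,
        decide_eq_false_iff_not] at hb
      have hyx : lexLE y x := by unfold lexLE; omega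
      rw [List.pairwise_cons]
      refine ⟨fun z hz => ?_, ih h.2⟩
      rcases (PySem.List.mem_insertBy _ _ _ _).mp hz with rfl | hz
      · exact hyx
      · exact h.1 _ hz

theorem sorted2_pairwise_lex (xs : List (Int × Int)) :
    (PySem.List.sorted2 xs (fun p => p.1) (fun p => p.2)).Pairwise lexLE := by
  have key : ∀ (ys : List (Int × Int)) (acc : List (Int × Int)), acc.Pairwise lexLE →
      (ys.foldl (fun acc x => PySem.List.insertBy
        (fun a b => decide (a.1 < b.1) || !decide (b.1 < a.1) && decide (a.2 < b.2)) x acc) acc).Pairwise lexLE := by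
    intro ys
    induction ys with
    | nil => exact fun acc h => h
    | cons x ys ih => exact fun acc h => ih _ (pairwise_insertBy_lex x acc h)
  simpa [PySem.List.sorted2] using key xs [] (by simp)

-- folding A's step over trailing end events never changes max_cnt or res
theorem foldA_ends (en : List Int) (cnt mx : Int) (res : Option Int) (h : cnt ≤ mx) :
    (en.map (fun e => (e, (-1 : Int)))).foldl sweepStepA (cnt, mx, res) = (cnt - en.length, mx, res) := by
  induction en generalizing cnt with
  | nil => simp
  | cons e en ih =>
    simp only [List.map_cons, List.foldl_cons, sweepStepA]
    rw [if_neg (by omega)]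
    rw [ih (cnt + -1) (by omega)]
    simp only [List.length_cons]
    congr 1
    push_cast
    ring

-- B's two-pointer sweep computes A's fold over the merged event order
theorem loopB_eq_foldA : ∀ (st en : List Int) (cnt mx : Int) (res : Option Int), cnt ≤ mx →
    sweepLoopB st en cnt mx res = ((mEv st en).foldl sweepStepA (cnt, mx, res)).2.2
  | [], en, cnt, mx, res, h => by
    simp only [sweepLoopB, mEv]
    rw [foldA_ends en cnt mx res h]
  | s :: st, [], cnt, mx, res, h => by
    simp only [sweepLoopB, mEv, List.foldl_cons, sweepStepA]
    split
    · exact loopB_eq_foldA st [] (cnt + 1) (cnt + 1) (some s) (le_refl _)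
    · rename_i hc
      exact loopB_eq_foldA st [] (cnt + 1) mx res (by omega)
  | s :: st, e :: en, cnt, mx, res, h => by
    simp only [sweepLoopB, mEv]
    split
    · simp only [List.foldl_cons, sweepStepA]
      split
      · exact loopB_eq_foldA st (e :: en) (cnt + 1) (cnt + 1) (some s) (le_refl _)
      · rename_i hc
        exact loopB_eq_foldA st (e :: en) (cnt + 1) mx res (by omega)
    · simp only [List.foldl_cons, sweepStepA]
      rw [if_neg (by omega), show (cnt + -1 : Int) = cnt - 1 from by ring]
      exact loopB_eq_foldA (s :: st) en (cnt - 1) mx res (by omega)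
termination_by st en => st.length + en.length

-- the events A builds are a permutation of starts-tagged ++ ends-tagged
theorem events_perm (intervals : List (Int × Int)) :
    (intervals.foldl (fun es p => es ++ [(p.1, (1 : Int)), (p.2, (-1 : Int))]) []).Perm
      ((intervals.map (fun p => p.1)).map (fun s => (s, 1)) ++
       (intervals.map (fun p => p.2)).map (fun e => (e, -1))) := by
  rw [PySem.List.foldl_append_eq_flatMap]
  induction intervals with
  | nil => simp
  | cons p l ih =>
    simp only [List.flatMap_cons, List.map_cons, List.cons_append]
    refine List.Perm.cons _ ?_
    refine (ih.cons _).trans ?_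
    exact (List.perm_middle).symm

theorem lexLE_antisymm {a b : Int × Int} (h1 : lexLE a b) (h2 : lexLE b a) : a = b := by
  unfold lexLE at *
  have : a.1 = b.1 ∧ a.2 = b.2 := by omega
  exact Prod.ext this.1 this.2

-- A's sorted event list IS the merged order of the two sorted lists
theorem sorted_events_eq (intervals : List (Int × Int)) :
    PySem.List.sorted2 (intervals.foldl (fun es p => es ++ [(p.1, (1 : Int)), (p.2, (-1 : Int))]) [])
        (fun p => p.1) (fun p => p.2) =
      mEv (PySem.List.sorted (intervals.map (fun p => p.1)) (fun x => x))
          (PySem.List.sorted (intervals.map (fun p => p.2)) (fun x => x)) := by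
  apply List.Perm.eq_of_pairwise (le := lexLE)
    (fun a b _ _ h1 h2 => lexLE_antisymm h1 h2)
  · exact sorted2_pairwise_lex _
  · exact mEv_pairwise _ _
      (by simpa using PySem.List.sorted_pairwise (intervals.map (fun p => p.1)) (fun x => x))
      (by simpa using PySem.List.sorted_pairwise (intervals.map (fun p => p.2)) (fun x => x))
  · refine (PySem.List.sorted2_perm _ _ _ _).trans ?_
    refine (events_perm intervals).trans ?_
    refine List.Perm.trans ?_ (mEv_perm _ _).symm
    exact List.Perm.append
      (((PySem.List.sorted_perm _ _ _).map _).symm)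
      (((PySem.List.sorted_perm _ _ _).map _).symm)

-- ===== VERDICT (by name: the statement is the Claim_ definition above) =====
theorem sweep_maxnum_spec : Claim_equal_sweep_maxnum := by
  intro intervals _
  show sweep_maxnum intervals = sweep_maxnum_alt intervals
  simp only [sweep_maxnum, sweep_maxnum_alt]
  rw [sorted_events_eq intervals, loopB_eq_foldA _ _ 0 0 none (le_refl _)]
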